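-- pv_equiv track=rewrite | github.com/goufeng928/finance | LIBRARY/GF_PY3_FUNCTION_CTypes.py | COPY_STRING_DELETE_GIVEN_CHAR_AT_FINAL
-- ===== SOURCE A (Python) =====
-- def COPY_STRING_DELETE_GIVEN_CHAR_AT_FINAL(STRING:str, GIVEN_CHAR:str) -> str:
--
--     STRING_LENGTH:int  = len(STRING)
--     STRING_CHARAC:list = []
--     # ----------------------------------------------
--     LEFT:int = 0
--     RIGH:int = STRING_LENGTH - 1
--     while LEFT <= RIGH:
--         """ Within The Loop Statement. """
--         if (LEFT == RIGH and STRING[LEFT] == GIVEN_CHAR):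
--             LEFT = LEFT + 1
--         else:
--             STRING_CHARAC.append(STRING[LEFT])
--             LEFT = LEFT + 1
--     # ----------------------------------------------
--     return str('').join(STRING_CHARAC)
-- ===== SOURCE B (Python) =====
-- def COPY_STRING_DELETE_GIVEN_CHAR_AT_FINAL(STRING: str, GIVEN_CHAR: str) -> str:
--     if STRING[-1:] == GIVEN_CHAR:
--         return STRING[:-1]
--     return STRING
-- ===== Notes on version B (the rewrite author's own statement) =====
-- stated objective: idiomatic
-- what changed: Replaced the two-pointer character-copying loop (which walks the whole string appending each char unless it is the last one and equals GIVEN_CHAR) by a closed-form conditional: compare the one-character tail slice with GIVEN_CHAR and slice off the final character when they match.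
import Mathlib
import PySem

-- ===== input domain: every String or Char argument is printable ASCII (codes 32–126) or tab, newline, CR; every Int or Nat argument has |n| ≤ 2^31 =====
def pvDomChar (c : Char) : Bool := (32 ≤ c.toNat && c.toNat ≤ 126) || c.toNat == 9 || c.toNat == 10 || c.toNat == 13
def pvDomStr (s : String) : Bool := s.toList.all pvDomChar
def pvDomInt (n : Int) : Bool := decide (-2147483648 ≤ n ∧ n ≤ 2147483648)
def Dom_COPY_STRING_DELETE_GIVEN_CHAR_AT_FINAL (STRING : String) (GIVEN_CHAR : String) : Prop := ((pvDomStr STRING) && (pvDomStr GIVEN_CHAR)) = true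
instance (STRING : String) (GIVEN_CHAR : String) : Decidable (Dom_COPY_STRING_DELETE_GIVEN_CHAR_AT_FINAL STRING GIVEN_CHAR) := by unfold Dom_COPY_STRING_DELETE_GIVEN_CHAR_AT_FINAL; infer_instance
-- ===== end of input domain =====

-- B replaces A's two-pointer character-copying loop by the idiomatic closed-form
-- conditional (compare the one-character tail slice with GIVEN_CHAR, slice it off on a match).

-- ===== PORT A =====
-- the while loop: LEFT walks 0..RIGH, appending STRING[LEFT] (a 1-char string) unless
-- LEFT == RIGH and STRING[LEFT] == GIVEN_CHAR.  STRING[LEFT] is read in both branches of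
-- the 'if', so the single pyGet? match is faithful; it is in range whenever 0 ≤ LEFT ≤ RIGH.
def pvALoop (STRING GIVEN_CHAR : String) (LEFT RIGH : Int) (acc : List String) : List String :=
  if LEFT ≤ RIGH then
    match PySem.Str.pyGet? STRING LEFT with
    | some c =>
      if LEFT == RIGH && (String.ofList [c] == GIVEN_CHAR) then
        pvALoop STRING GIVEN_CHAR (LEFT + 1) RIGH acc
      else
        pvALoop STRING GIVEN_CHAR (LEFT + 1) RIGH (acc ++ [String.ofList [c]])
    | none => acc  -- IndexError: unreachable for 0 ≤ LEFT < len(STRING)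
  else acc
termination_by (RIGH + 1 - LEFT).toNat
decreasing_by all_goals omega

def COPY_STRING_DELETE_GIVEN_CHAR_AT_FINAL (STRING : String) (GIVEN_CHAR : String) : String :=
  -- STRING_LENGTH = len(STRING); ''.join of the accumulated 1-char strings
  PySem.Str.join "" (pvALoop STRING GIVEN_CHAR 0 ((PySem.Str.len STRING : Int) - 1) [])

-- ===== PORT B =====
def COPY_STRING_DELETE_GIVEN_CHAR_AT_FINAL_alt (STRING : String) (GIVEN_CHAR : String) : String :=
  if PySem.Str.slice STRING (some (-1)) none == GIVEN_CHAR then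
    PySem.Str.slice STRING none (some (-1))
  else
    STRING

-- ===== PRECONDITION & SPEC =====
def Spec_COPY_STRING_DELETE_GIVEN_CHAR_AT_FINAL (STRING : String) (GIVEN_CHAR : String) (out : String) : Prop := out = COPY_STRING_DELETE_GIVEN_CHAR_AT_FINAL_alt STRING GIVEN_CHAR
instance (STRING : String) (GIVEN_CHAR : String) (out : String) : Decidable (Spec_COPY_STRING_DELETE_GIVEN_CHAR_AT_FINAL STRING GIVEN_CHAR out) := by unfold Spec_COPY_STRING_DELETE_GIVEN_CHAR_AT_FINAL; infer_instance

-- ===== CLAIM (what is proved, stated in full; the proofs are below) =====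
def Claim_equal_COPY_STRING_DELETE_GIVEN_CHAR_AT_FINAL : Prop := ∀ (STRING : String) (GIVEN_CHAR : String), Dom_COPY_STRING_DELETE_GIVEN_CHAR_AT_FINAL STRING GIVEN_CHAR → Spec_COPY_STRING_DELETE_GIVEN_CHAR_AT_FINAL STRING GIVEN_CHAR (COPY_STRING_DELETE_GIVEN_CHAR_AT_FINAL STRING GIVEN_CHAR)

-- ===== LEMMAS AND PROOFS =====

-- what the loop keeps of a suffix: everything, except that a final char equal to GIVEN_CHAR is dropped
def pvTail (G : String) (l : List Char) : List Char :=
  match l.getLast? with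
  | some c => if String.ofList [c] == G then l.dropLast else l
  | none => []

lemma pvTail_cons (G : String) (c : Char) (l : List Char) (h : l ≠ []) :
    pvTail G (c :: l) = c :: pvTail G l := by
  cases l with
  | nil => exact absurd rfl h
  | cons a t =>
    obtain ⟨x, hx⟩ := Option.isSome_iff_exists.mp (List.getLast?_isSome.mpr (by simp : a :: t ≠ []))
    simp only [pvTail, List.getLast?_cons_cons, hx, List.dropLast_cons₂]
    split <;> rfl

lemma pvALoop_spec (S G : String) : ∀ (k j : Nat) (acc : List String),
    j + k = S.toList.length →
    pvALoop S G (j : Int) ((S.toList.length : Int) - 1) acc =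
      acc ++ (pvTail G (S.toList.drop j)).map (fun c => String.ofList [c]) := by
  intro k
  induction k with
  | zero =>
    intro j acc hj
    rw [pvALoop, if_neg (by omega)]
    have hd : S.toList.drop j = [] := List.drop_of_length_le (by omega)
    simp [hd, pvTail]
  | succ k ih =>
    intro j acc hj
    have hjlt : j < S.toList.length := by omega
    rw [pvALoop, if_pos (by omega : (j : Int) ≤ (S.toList.length : Int) - 1)]
    have hget : PySem.Str.pyGet? S (j : Int) = some (S.toList[j]'hjlt) := by
      simp [List.getElem?_eq_getElem hjlt]
    rw [hget]
    have hdrop : S.toList.drop j = S.toList[j]'hjlt :: S.toList.drop (j + 1) :=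
      List.drop_eq_getElem_cons hjlt
    by_cases hlast : j = S.toList.length - 1
    · -- LEFT == RIGH : the final character
      have heq : ((j : Int) == (S.toList.length : Int) - 1) = true := by
        simp only [beq_iff_eq]; omega
      have hdropn : S.toList.drop (j + 1) = [] := List.drop_of_length_le (by omega)
      have htl : S.toList.drop j = [S.toList[j]'hjlt] := by rw [hdrop, hdropn]
      have h1 := ih (j + 1) acc (by omega)
      have h2 := ih (j + 1) (acc ++ [String.ofList [S.toList[j]'hjlt]]) (by omega)
      push_cast at h1 h2
      by_cases hc : (String.ofList [S.toList[j]'hjlt] == G) = true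
      · simp only [heq, hc, Bool.and_self, if_true]
        rw [h1]
        simp [hdropn, htl, pvTail, hc]
      · have hcf : (String.ofList [S.toList[j]'hjlt] == G) = false := by
          simpa using hc
        simp only [heq, hcf, Bool.and_false, Bool.false_eq_true, if_false]
        rw [h2]
        simp [hdropn, htl, pvTail, hcf]
    · -- LEFT < RIGH : always copy
      have heq : ((j : Int) == (S.toList.length : Int) - 1) = false := by
        simp only [beq_eq_false_iff_ne, ne_eq]; omega
      have h2 := ih (j + 1) (acc ++ [String.ofList [S.toList[j]'hjlt]]) (by omega)
      push_cast at h2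
      simp only [heq, Bool.false_and, Bool.false_eq_true, if_false]
      rw [h2]
      have hne : S.toList.drop (j + 1) ≠ [] := by
        simp only [ne_eq, List.drop_eq_nil_iff]; omega
      rw [hdrop, pvTail_cons G _ _ hne]
      simp

lemma toList_A (S G : String) :
    (COPY_STRING_DELETE_GIVEN_CHAR_AT_FINAL S G).toList = pvTail G S.toList := by
  unfold COPY_STRING_DELETE_GIVEN_CHAR_AT_FINAL
  have h := pvALoop_spec S G S.toList.length 0 [] (by omega)
  simp only [Nat.cast_zero, List.drop_zero, List.nil_append] at h
  have hlen : ((PySem.Str.len S : Int)) = ((S.toList.length : Int)) := by simp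
  rw [hlen, h, PySem.Str.toList_join]
  simp only [List.map_map, Function.comp_def]
  simp [PySem.Chars.join_nil_singletons (pvTail G S.toList)]

theorem pv_main (S G : String) :
    COPY_STRING_DELETE_GIVEN_CHAR_AT_FINAL S G = COPY_STRING_DELETE_GIVEN_CHAR_AT_FINAL_alt S G := by
  apply String.toList_inj.mp
  rw [toList_A]
  unfold COPY_STRING_DELETE_GIVEN_CHAR_AT_FINAL_alt
  have hinit : (PySem.Str.slice S none (some (-1))).toList = S.toList.dropLast := by
    simp [PySem.List.slice_to_neg_one]
  rcases List.eq_nil_or_concat S.toList with hnil | ⟨l, c, hlc⟩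
  · have hsl : PySem.Str.slice S (some (-1)) none = S := by
      apply String.toList_inj.mp
      simp [PySem.List.slice_from_neg_one, hnil]
    rw [hsl]
    by_cases hG : (S == G) = true
    · rw [if_pos hG, hinit]
      simp [pvTail, hnil]
    · rw [if_neg (by simpa using hG)]
      simp [pvTail, hnil]
  · have hgl : S.toList.getLast? = some c := by rw [hlc]; simp
    have hsl : PySem.Str.slice S (some (-1)) none = String.ofList [c] := by
      apply String.toList_inj.mp
      simp only [PySem.Str.toList_slice, PySem.Chars.slice_eq_listSlice,
        PySem.List.slice_from_neg_one]
      rw [hlc]; simp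
    rw [hsl]
    by_cases hc : (String.ofList [c] == G) = true
    · rw [if_pos hc, hinit]
      simp [pvTail, hgl, hc]
    · rw [if_neg (by simpa using hc)]
      simp [pvTail, hgl, hc]

-- ===== VERDICT (by name: the statement is the Claim_ definition above) =====
theorem COPY_STRING_DELETE_GIVEN_CHAR_AT_FINAL_spec : Claim_equal_COPY_STRING_DELETE_GIVEN_CHAR_AT_FINAL := by
  intro S G _
  exact pv_main S G
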